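-- pv_equiv track=rewrite | github.com/RickKessler/SNANA | util/plot_table.py | get_varname_dump
-- ===== SOURCE A (Python) =====
-- def get_varname_dump(varname_orig):
--     varname_dump = f"BINCENTER_{varname_orig}"
--
--     # replace or remove special symbols that should not be used for
--     # variables name
--     # e.g.,
--     #   BINCENTER_sqrt(q+3)  -> BINCENTER_sqrt_q+3
--     #   BINCENTER_q*5        -> BINCENTER_sqrt_q_x_5
--
--     replace_dict = {
--         ' ' : ''  ,
--         '(' : '_' ,
--         ')' : ''  ,
--         '*' : '_x_'
--     }
--
--     for ch0, ch1 in replace_dict.items():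
--         varname_dump = varname_dump.replace(ch0,ch1)
--
--     return varname_dump
-- ===== SOURCE B (Python) =====
-- def get_varname_dump(varname_orig):
--     # single pass over the characters instead of four cascaded .replace() scans
--     mapping = {' ': '', '(': '_', ')': '', '*': '_x_'}
--     return ''.join(mapping.get(ch, ch) for ch in f"BINCENTER_{varname_orig}")
-- ===== Notes on version B (the rewrite author's own statement) =====
-- stated objective: idiomatic
-- what changed: Replaces the four sequential whole-string .replace() passes with a single character-level pass that joins mapping.get(ch, ch) over the prefixed string (valid because no replacement output contains a replacement key).
import Mathlib
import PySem

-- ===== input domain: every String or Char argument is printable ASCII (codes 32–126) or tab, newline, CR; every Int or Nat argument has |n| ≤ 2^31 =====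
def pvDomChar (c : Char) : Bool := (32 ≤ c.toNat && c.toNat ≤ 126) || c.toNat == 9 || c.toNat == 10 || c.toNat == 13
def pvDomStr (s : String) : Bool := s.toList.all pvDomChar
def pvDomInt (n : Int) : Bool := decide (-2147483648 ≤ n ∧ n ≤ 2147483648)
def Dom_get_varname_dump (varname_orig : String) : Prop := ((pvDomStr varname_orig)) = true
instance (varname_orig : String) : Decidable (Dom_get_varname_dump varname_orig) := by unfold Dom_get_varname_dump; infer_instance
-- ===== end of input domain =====

-- B replaces A's four sequential whole-string .replace() passes with one character-level
-- pass joining mapping.get(ch, ch); equivalent because no replacement output contains a key.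

-- ===== PORT A =====
-- varname_dump = f"BINCENTER_{varname_orig}"; then for ch0, ch1 in replace_dict.items(): replace
def get_varname_dump (varname_orig : String) : String :=
  let varname_dump := "BINCENTER_" ++ varname_orig
  let replace_dict : List (String × String) := [(" ", ""), ("(", "_"), (")", ""), ("*", "_x_")]
  replace_dict.foldl (fun acc p => PySem.Str.replace acc p.1 p.2) varname_dump

-- ===== PORT B =====
-- ''.join(mapping.get(ch, ch) for ch in f"BINCENTER_{varname_orig}")
def get_varname_dump_alt (varname_orig : String) : String :=
  let mapping : PySem.Dict Char (List Char) :=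
    PySem.Dict.ofList [(' ', []), ('(', ['_']), (')', []), ('*', ['_', 'x', '_'])]
  String.ofList (("BINCENTER_" ++ varname_orig).toList.flatMap
    (fun ch => PySem.Dict.getD mapping ch [ch]))

-- ===== PRECONDITION & SPEC =====
def Spec_get_varname_dump (varname_orig : String) (out : String) : Prop := out = get_varname_dump_alt varname_orig
instance (varname_orig : String) (out : String) : Decidable (Spec_get_varname_dump varname_orig out) := by unfold Spec_get_varname_dump; infer_instance

-- ===== CLAIM (what is proved, stated in full; the proofs are below) =====
def Claim_equal_get_varname_dump : Prop := ∀ (varname_orig : String), Dom_get_varname_dump varname_orig → Spec_get_varname_dump varname_orig (get_varname_dump varname_orig)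

-- ===== LEMMAS AND PROOFS =====

-- single-char replacement is a flatMap over the characters
theorem replace_go_single (c : Char) (new : List Char) :
    ∀ (l acc : List Char) (fuel : Nat), l.length ≤ fuel →
      PySem.Chars.replace.go [c] new fuel l acc
        = acc.reverse ++ l.flatMap (fun x => if x = c then new else [x]) := by
  intro l
  induction l with
  | nil =>
      intro acc fuel _
      cases fuel <;> simp [PySem.Chars.replace.go]
  | cons x t ih =>
      intro acc fuel hf
      cases fuel with
      | zero => simp at hf
      | succ f =>
        simp only [List.length_cons, Nat.succ_le_succ_iff] at hf
        by_cases hx : x = c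
        · subst hx
          have hp : List.isPrefixOf [x] (x :: t) = true := by
            simp [List.isPrefixOf]
          simp only [PySem.Chars.replace.go, hp, if_true]
          rw [show List.drop [x].length (x :: t) = t from rfl, ih _ f hf]
          simp
        · have hp : List.isPrefixOf [c] (x :: t) = false := by
            simp [List.isPrefixOf, Ne.symm hx]
          simp only [PySem.Chars.replace.go, hp]
          rw [ih _ f hf]
          simp [hx]

theorem replace_single (c : Char) (new s : List Char) :
    PySem.Chars.replace s [c] new = s.flatMap (fun x => if x = c then new else [x]) := by
  rw [PySem.Chars.replace]
  simp only [List.isEmpty_cons, Bool.false_eq_true, if_false]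
  simpa using replace_go_single c new s [] s.length le_rfl

theorem flatMap_flatMap (f g : Char → List Char) (s : List Char) :
    (s.flatMap f).flatMap g = s.flatMap (fun x => (f x).flatMap g) := by
  induction s with
  | nil => rfl
  | cons x t ih => simp [List.flatMap_cons, ih]

-- ===== VERDICT (by name: the statement is the Claim_ definition above) =====
theorem get_varname_dump_spec : Claim_equal_get_varname_dump := by
  intro v _
  unfold Spec_get_varname_dump get_varname_dump get_varname_dump_alt
  simp only [List.foldl_cons, List.foldl_nil]
  apply String.ext
  simp only [PySem.Str.toList_replace, String.toList_ofList, String.toList_append,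
    show (" " : String).toList = [' '] from rfl, show ("" : String).toList = [] from rfl,
    show ("(" : String).toList = ['('] from rfl, show ("_" : String).toList = ['_'] from rfl,
    show (")" : String).toList = [')'] from rfl, show ("*" : String).toList = ['*'] from rfl,
    show ("_x_" : String).toList = ['_', 'x', '_'] from rfl]
  rw [replace_single, replace_single, replace_single, replace_single,
      flatMap_flatMap, flatMap_flatMap, flatMap_flatMap]
  have hd : (PySem.Dict.ofList [(' ', ([] : List Char)), ('(', ['_']), (')', []), ('*', ['_', 'x', '_'])])
      = PySem.Dict.mk [(' ', []), ('(', ['_']), (')', []), ('*', ['_', 'x', '_'])] := by decide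
  apply List.flatMap_congr
  intro x _
  by_cases h1 : x = ' '
  · subst h1; decide
  by_cases h2 : x = '('
  · subst h2; decide
  by_cases h3 : x = ')'
  · subst h3; decide
  by_cases h4 : x = '*'
  · subst h4; decide
  simp [h1, h2, h3, h4, PySem.Dict.getD, hd, PySem.Dict.get?,
    Ne.symm h1, Ne.symm h2, Ne.symm h3, Ne.symm h4]
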